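-- pv_equiv track=rewrite | github.com/AlifSrSE/ProblemSolves | 2042B-gameWithColoredMarbles.py | solve
-- ===== SOURCE A (Python) =====
-- from collections import Counter
--
-- def solve(c):
--     color_to_count = Counter(c)
--
--     sorted_colors = sorted(c, key=lambda color: (color_to_count[color], color))
--
--     result = 0
--     for i in range(0, len(sorted_colors), 2):
--         if i == 0 or sorted_colors[i] != sorted_colors[i - 2]:
--             result += 1
--
--             if color_to_count[sorted_colors[i]] == 1:
--                 result += 1
--
--     return result
-- ===== SOURCE B (Python) =====
-- from collections import Counter
--
-- def solve(c):
--     u = 0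
--     g = 0
--     for v in Counter(c).values():
--         if v == 1:
--             u += 1
--         else:
--             g += 1
--     return u + u % 2 + g
-- ===== Notes on version B (the rewrite author's own statement) =====
-- stated objective: faster
-- what changed: Replaced the sort-by-(count,color) plus stride-2 index scan by a single Counter pass: count the colors that occur once (u) and the colors that occur more than once (g) and return the closed form u + u % 2 + g.
import Mathlib
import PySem

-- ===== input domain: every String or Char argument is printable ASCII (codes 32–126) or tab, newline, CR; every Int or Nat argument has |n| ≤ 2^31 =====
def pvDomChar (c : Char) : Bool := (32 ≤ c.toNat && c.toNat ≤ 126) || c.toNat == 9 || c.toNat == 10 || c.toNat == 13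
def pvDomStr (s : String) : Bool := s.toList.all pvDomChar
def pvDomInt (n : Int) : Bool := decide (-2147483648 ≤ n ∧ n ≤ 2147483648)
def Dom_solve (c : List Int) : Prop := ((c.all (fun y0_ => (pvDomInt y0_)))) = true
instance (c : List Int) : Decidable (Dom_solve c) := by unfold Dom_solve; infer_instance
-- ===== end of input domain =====

-- B replaces A's sort-by-(count,color) + stride-2 index scan by a single counting pass and the
-- closed form u + u % 2 + g (u = colors occurring once, g = colors occurring more than once).

-- ===== PORT A =====
def solve (c : List Int) : Int :=
  let cnt := PySem.Dict.counter c
  let s := PySem.List.sorted2 c (fun color => cnt.getD color 0) (fun color => color)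
  (PySem.List.pyRange 0 (s.length : Int) 2).foldl
    (fun result i =>
      if i = 0 ∨ PySem.List.pyGetD s i 0 ≠ PySem.List.pyGetD s (i - 2) 0 then
        let result := result + 1
        if cnt.getD (PySem.List.pyGetD s i 0) 0 = 1 then result + 1 else result
      else result) 0

-- ===== PORT B =====
def solve_alt (c : List Int) : Int :=
  let ug := (PySem.Dict.counter c).values.foldl
    (fun (ug : Int × Int) v => if v = 1 then (ug.1 + 1, ug.2) else (ug.1, ug.2 + 1)) (0, 0)
  ug.1 + PySem.Int.mod ug.1 2 + ug.2

-- ===== PRECONDITION & SPEC =====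
def Spec_solve (c : List Int) (out : Int) : Prop := out = solve_alt c
instance (c : List Int) (out : Int) : Decidable (Spec_solve c out) := by unfold Spec_solve; infer_instance

-- ===== CLAIM (what is proved, stated in full; the proofs are below) =====
def Claim_equal_solve : Prop := ∀ (c : List Int), Dom_solve c → Spec_solve c (solve c)

-- ===== LEMMAS AND PROOFS =====

-- weight added by A's loop when a fresh color is seen at an even index
def wt (c : List Int) (x : Int) : Int := if List.count x c = 1 then 2 else 1

-- A's stride-2 loop, rephrased as structural recursion: look at the head, remember it, skip one
def loopA (wf : Int → Int) : Option Int → List Int → Int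
  | _, [] => 0
  | prev, x :: rest =>
      (if prev = some x then 0 else wf x) + loopA wf (some x) (rest.drop 1)
  termination_by _ l => l.length
  decreasing_by simp

-- the sort key of A, as a lexicographic pair
def keyL (c : List Int) (x : Int) : Lex (Int × Int) := toLex ((List.count x c : Int), x)

-- the distinct colors in A's sorted order, and A's sorted list rebuilt from blocks of equal colors
def DD (c : List Int) : List Int := PySem.List.sorted (PySem.Set.ofList c) (keyL c)
def flatB (c : List Int) (l : List Int) : List Int :=
  l.flatMap (fun k => List.replicate (List.count k c) k)

lemma keyL_inj (c : List Int) {a b : Int} (h : keyL c a = keyL c b) : a = b := by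
  have := congrArg (fun p => (ofLex p).2) h
  simpa [keyL] using this

lemma sorted2_as_sorted (c : List Int) :
    PySem.List.sorted2 c (fun color => (PySem.Dict.counter c).getD color 0) (fun color => color)
      = PySem.List.sorted c (keyL c) := by
  have h : (fun (a b : Int) =>
        decide ((PySem.Dict.counter c).getD a 0 < (PySem.Dict.counter c).getD b 0) ||
          (!decide ((PySem.Dict.counter c).getD b 0 < (PySem.Dict.counter c).getD a 0) &&
            decide (a < b)))
      = fun a b => decide (keyL c a < keyL c b) := by
    funext a b
    simp only [PySem.Dict.getD_counter, keyL, Prod.Lex.lt_iff, ofLex_toLex]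
    by_cases h1 : (List.count a c : Int) < (List.count b c : Int) <;>
      by_cases h2 : (List.count b c : Int) < (List.count a c : Int) <;>
        by_cases h3 : a < b <;> simp [h1, h2, h3] <;> omega
  unfold PySem.List.sorted2 PySem.List.sorted
  simp only [Bool.false_eq_true, if_false, h]

lemma flatB_cons (c : List Int) (k : Int) (l : List Int) :
    flatB c (k :: l) = List.replicate (List.count k c) k ++ flatB c l := by
  simp [flatB]

lemma count_flat (c : List Int) (v : Int) :
    ∀ l : List Int, l.Nodup →
      List.count v (flatB c l) = if v ∈ l then List.count v c else 0 := by
  intro l hl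
  induction l with
  | nil => simp [flatB]
  | cons k l ih =>
    simp only [List.nodup_cons] at hl
    have ih' := ih hl.2
    rw [flatB_cons, List.count_append, List.count_replicate, ih']
    by_cases hv : v = k
    · subst hv
      simp [hl.1]
    · simp [hv, Ne.symm hv]

lemma nodup_DD (c : List Int) : (DD c).Nodup :=
  ((PySem.List.sorted_perm (PySem.Set.ofList c) (keyL c) false).nodup_iff).mpr
    (PySem.Set.nodup_ofList c)

lemma mem_DD (c : List Int) (v : Int) : v ∈ DD c ↔ v ∈ c := by
  unfold DD
  rw [PySem.List.mem_sorted, PySem.Set.mem_ofList]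

lemma flat_perm (c : List Int) : (flatB c (DD c)).Perm c := by
  rw [List.perm_iff_count]
  intro v
  rw [count_flat c v _ (nodup_DD c)]
  by_cases hv : v ∈ DD c
  · simp [hv]
  · simp [hv, List.count_eq_zero_of_not_mem (by rwa [← mem_DD c v])]

lemma pairwise_flat (c : List Int) (l : List Int)
    (h : l.Pairwise (fun a b => keyL c a ≤ keyL c b)) :
    (flatB c l).Pairwise (fun a b => keyL c a ≤ keyL c b) := by
  induction l with
  | nil => simp [flatB]
  | cons k l ih =>
    rw [List.pairwise_cons] at h
    have hrest := ih h.2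
    rw [flatB_cons, List.pairwise_append]
    refine ⟨List.pairwise_replicate.mpr (by simp), hrest, ?_⟩
    intro x hx y hy
    rw [List.eq_of_mem_replicate hx]
    simp only [flatB, List.mem_flatMap] at hy
    obtain ⟨k', hk', hy⟩ := hy
    rw [List.eq_of_mem_replicate hy]
    exact h.1 k' hk'

lemma sorted_eq_flat (c : List Int) :
    PySem.List.sorted c (keyL c) = flatB c (DD c) := by
  refine List.eq_of_perm_of_sorted ?_ (PySem.List.sorted_pairwise c (keyL c))
    (pairwise_flat c _ (PySem.List.sorted_pairwise _ (keyL c)))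
    ((PySem.List.sorted_perm c (keyL c) false).trans (flat_perm c).symm)
  intro a b _ _ h1 h2
  exact keyL_inj c (le_antisymm h1 h2)

lemma pyRange_two_nil {a b : Int} (h : b ≤ a) : PySem.List.pyRange a b 2 = [] := by
  rw [PySem.List.pyRange_of_pos a b (by norm_num)]
  simp [not_lt.mpr h]

lemma pyRange_two_cons {a b : Int} (h : a < b) :
    PySem.List.pyRange a b 2 = a :: PySem.List.pyRange (a + 2) b 2 := by
  rw [PySem.List.pyRange_of_pos a b (by norm_num),
      PySem.List.pyRange_of_pos (a + 2) b (by norm_num)]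
  have hN : ((b - a + 2 - 1) / 2).toNat
      = (if a + 2 < b then ((b - (a + 2) + 2 - 1) / 2).toNat else 0) + 1 := by
    split_ifs <;> omega
  rw [if_pos h, hN, List.range_succ_eq_map]
  simp only [List.map_cons, List.map_map, Nat.cast_zero, mul_zero, add_zero]
  refine congrArg (a :: ·) (List.map_congr_left fun k _ => by
    simp only [Function.comp, Nat.succ_eq_add_one]; push_cast; ring)

lemma fold_step (s : List Int) (wf : Int → Int) :
    ∀ (fuel j : ℕ) (acc : Int), 2 ≤ j → s.length ≤ j + fuel →
      (PySem.List.pyRange (j : Int) (s.length : Int) 2).foldl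
        (fun result i =>
          if i = 0 ∨ PySem.List.pyGetD s i 0 ≠ PySem.List.pyGetD s (i - 2) 0 then
            result + wf (PySem.List.pyGetD s i 0)
          else result) acc
      = acc + loopA wf (some (s.getD (j - 2) 0)) (s.drop j) := by
  intro fuel
  induction fuel with
  | zero =>
    intro j acc hj hlen
    have hl : s.length ≤ j := by omega
    rw [pyRange_two_nil (by exact_mod_cast hl), List.drop_of_length_le hl]
    simp [loopA]
  | succ fuel ih =>
    intro j acc hj hlen
    by_cases hjl : s.length ≤ j
    · rw [pyRange_two_nil (by exact_mod_cast hjl), List.drop_of_length_le hjl]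
      simp [loopA]
    · rw [not_le] at hjl
      rw [pyRange_two_cons (by exact_mod_cast hjl)]
      rw [List.foldl_cons]
      have hcast : ((j : Int) + 2) = ((j + 2 : ℕ) : Int) := by push_cast; ring
      rw [hcast, ih (j + 2) _ (by omega) (by omega)]
      have hx : PySem.List.pyGetD s (j : Int) 0 = s.getD j 0 := by
        simp [PySem.List.pyGetD_natCast]
      have hc2 : ((j : Int) - 2) = ((j - 2 : ℕ) : Int) := by omega
      have hp : PySem.List.pyGetD s ((j : Int) - 2) 0 = s.getD (j - 2) 0 := by
        rw [hc2]; simp [PySem.List.pyGetD_natCast]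
      have hdrop : s.drop j = s.getD j 0 :: s.drop (j + 1) := by
        rw [List.getD_eq_getElem s 0 hjl, List.drop_eq_getElem_cons hjl]
      have hj0 : ¬ ((j : Int) = 0) := by omega
      have h2 : (j + 2) - 2 = j := by omega
      rw [h2, hdrop]
      simp only [loopA, List.drop_drop]
      have h3 : j + 1 + 1 = j + 2 := by omega
      rw [h3]
      simp only [hj0, hx, hp, false_or, List.getD]
      by_cases heq : s[j]?.getD 0 = s[j - 2]?.getD 0
      · rw [if_neg (by simp [heq]), if_pos (congrArg some heq.symm)]
        ring
      · rw [if_pos heq, if_neg (fun h => heq (Option.some_inj.mp h).symm)]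
        ring

lemma fold_eq_loopA (s : List Int) (wf : Int → Int) :
    (PySem.List.pyRange 0 (s.length : Int) 2).foldl
      (fun result i =>
        if i = 0 ∨ PySem.List.pyGetD s i 0 ≠ PySem.List.pyGetD s (i - 2) 0 then
          result + wf (PySem.List.pyGetD s i 0)
        else result) 0 = loopA wf none s := by
  cases s with
  | nil =>
    rw [pyRange_two_nil (by simp)]
    simp [loopA]
  | cons x t =>
    rw [pyRange_two_cons (by exact_mod_cast Nat.succ_pos t.length), List.foldl_cons]
    rw [show ((0 : Int) + 2) = ((2 : ℕ) : Int) by norm_num,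
        fold_step (x :: t) wf (x :: t).length 2 _ (le_refl 2) (by omega)]
    simp [loopA, PySem.List.pyGetD_zero_cons]

lemma loopA_skip (wf : Int → Int) (k : Int) :
    ∀ (j : ℕ) (t : List Int),
      loopA wf (some k) (List.replicate j k ++ t)
        = loopA wf (some k) (if j % 2 = 1 then t.drop 1 else t) := by
  intro j
  induction j using Nat.twoStepInduction with
  | zero => intro t; simp
  | one => intro t; simp [loopA]
  | more j ih _ =>
    intro t
    have : List.replicate (j + 2) k ++ t = k :: k :: (List.replicate j k ++ t) := by
      simp [List.replicate_succ]
    rw [this]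
    simp only [loopA, List.tail_cons, List.drop_one]
    rw [ih t]
    have h2 : (j + 2) % 2 = j % 2 := by omega
    simp [h2]

lemma loopA_block (wf : Int → Int) (k : Int) (e : ℕ) (he : 1 ≤ e) (t : List Int)
    (prev : Option Int) (hp : prev ≠ some k) :
    loopA wf prev (List.replicate e k ++ t)
      = wf k + loopA wf (some k) (if e % 2 = 1 then t.drop 1 else t) := by
  obtain ⟨e', rfl⟩ : ∃ e', e = e' + 1 := ⟨e - 1, by omega⟩
  rw [List.replicate_succ, List.cons_append]
  simp only [loopA, if_neg hp, List.drop_one]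
  by_cases h0 : e' = 0
  · subst h0; simp
  · have : (List.replicate e' k ++ t).tail = List.replicate (e' - 1) k ++ t := by
      obtain ⟨e'', rfl⟩ : ∃ e'', e' = e'' + 1 := ⟨e' - 1, by omega⟩
      simp [List.replicate_succ]
    have hpar : (e' - 1) % 2 = (e' + 1) % 2 := by omega
    rw [this, loopA_skip, hpar]
    simp [List.drop_one]

lemma loopA_multi (wf : Int → Int) (m : Int → ℕ) :
    ∀ (bs : List Int) (prev : Option Int) (b : Prop) [Decidable b],
      bs.Nodup → (∀ x ∈ bs, prev ≠ some x) → (∀ x ∈ bs, 2 ≤ m x ∧ wf x = 1) →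
      loopA wf prev
        (if b then (bs.flatMap (fun k => List.replicate (m k) k)).drop 1
         else bs.flatMap (fun k => List.replicate (m k) k)) = bs.length := by
  intro bs
  induction bs with
  | nil =>
    intro prev b _ _ _ _
    by_cases hb : b <;> simp [hb, loopA]
  | cons k bs ih =>
    intro prev b _ hnd hprev hm
    simp only [List.flatMap_cons]
    simp only [List.nodup_cons] at hnd
    have hmk := hm k (by simp)
    have hrec : ∀ (e : ℕ), 1 ≤ e →
        loopA wf prev (List.replicate e k ++ bs.flatMap (fun k => List.replicate (m k) k))
          = (bs.length : Int) + 1 := by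
      intro e he
      rw [loopA_block wf k e he _ prev (hprev k (by simp))]
      rw [ih (some k) (e % 2 = 1) hnd.2
        (fun x hx h => hnd.1 (by rw [Option.some_inj.mp h]; exact hx))
        (fun x hx => hm x (by simp [hx]))]
      rw [hmk.2]; ring
    by_cases hb : b
    · rw [if_pos hb]
      have hsplit : (List.replicate (m k) k
            ++ bs.flatMap (fun k => List.replicate (m k) k)).drop 1
          = List.replicate (m k - 1) k ++ bs.flatMap (fun k => List.replicate (m k) k) := by
        obtain ⟨n, hn⟩ : ∃ n, m k = n + 1 := ⟨m k - 1, by omega⟩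
        rw [hn]; simp [List.replicate_succ]
      rw [hsplit, hrec (m k - 1) (by omega)]
      simp
    · rw [if_neg hb, hrec (m k) (by omega)]
      simp

lemma loopA_single (wf : Int → Int) :
    ∀ (ks t : List Int) (prev : Option Int), ks.Nodup → (∀ x ∈ ks, prev ≠ some x) →
      (∀ x ∈ ks, wf x = 2) →
      ∃ prev', (prev' = prev ∨ ∃ x ∈ ks, prev' = some x) ∧
        loopA wf prev (ks ++ t)
          = (ks.length : Int) + ((ks.length % 2 : ℕ) : Int) +
            loopA wf prev' (if ks.length % 2 = 1 then t.drop 1 else t)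
  | [], t, prev => by
    intro _ _ _
    exact ⟨prev, Or.inl rfl, by simp⟩
  | [a], t, prev => by
    intro _ hprev hw
    refine ⟨some a, Or.inr ⟨a, by simp, rfl⟩, ?_⟩
    simp [loopA, hprev a (by simp), hw a (by simp)]
  | a :: b :: ks2, t, prev => by
    intro hnd hprev hw
    simp only [List.nodup_cons, List.mem_cons] at hnd
    obtain ⟨prev', hp', heq⟩ := loopA_single wf ks2 t (some a)
      hnd.2.2
      (fun x hx h => hnd.1 (Or.inr (Option.some_inj.mp h ▸ hx)))
      (fun x hx => hw x (by simp [hx]))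
    refine ⟨prev', ?_, ?_⟩
    · rcases hp' with h | ⟨x, hx, h⟩
      · exact Or.inr ⟨a, by simp, h⟩
      · exact Or.inr ⟨x, by simp [hx], h⟩
    · have h1 : loopA wf prev ((a :: b :: ks2) ++ t) = 2 + loopA wf (some a) (ks2 ++ t) := by
        simp only [List.cons_append, loopA, List.drop_one, List.tail_cons]
        rw [if_neg (hprev a (by simp)), hw a (by simp)]
      rw [h1, heq]
      have hpar : (ks2.length + 2) % 2 = ks2.length % 2 := by omega
      simp only [List.length_cons, hpar]
      push_cast
      ring_nf

lemma split_filter (q : Int → Bool) :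
    ∀ l : List Int, l.Pairwise (fun a b => q b = true → q a = true) →
      l = l.filter q ++ l.filter (fun x => !q x) := by
  intro l h
  induction l with
  | nil => simp
  | cons x t ih =>
    rw [List.pairwise_cons] at h
    by_cases hx : q x
    · simp only [List.filter_cons, hx, Bool.not_true, if_pos, List.cons_append]
      exact congrArg (x :: ·) (ih h.2)
    · have hall : ∀ y ∈ t, q y = false := by
        intro y hy
        cases hqy : q y
        · rfl
        · exact absurd (h.1 y hy hqy) hx
      have h1 : (x :: t).filter q = [] := by
        rw [List.filter_eq_nil_iff]
        intro y hy
        rcases List.mem_cons.mp hy with rfl | hy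
        · simpa using hx
        · simp [hall y hy]
      have h2 : (x :: t).filter (fun y => !q y) = x :: t := by
        rw [List.filter_eq_self]
        intro y hy
        rcases List.mem_cons.mp hy with rfl | hy
        · simp [hx]
        · simp [hall y hy]
      rw [h1, h2, List.nil_append]

lemma flatB_ones (c : List Int) :
    ∀ l : List Int, (∀ x ∈ l, List.count x c = 1) → flatB c l = l := by
  intro l h
  induction l with
  | nil => simp [flatB]
  | cons x t ih =>
    rw [flatB_cons, h x (by simp), List.replicate_one, List.singleton_append]
    exact congrArg (x :: ·) (ih fun y hy => h y (by simp [hy]))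

lemma loop_value (c : List Int) :
    loopA (wt c) none (flatB c (DD c))
      = (((DD c).countP (fun x => decide (List.count x c = 1)) : ℕ) : Int)
        + ((((DD c).countP (fun x => decide (List.count x c = 1)) % 2 : ℕ)) : Int)
        + (((DD c).countP (fun x => !decide (List.count x c = 1)) : ℕ) : Int) := by
  set q : Int → Bool := fun x => decide (List.count x c = 1) with hq
  have hcount1 : ∀ x ∈ DD c, 1 ≤ List.count x c := by
    intro x hx
    exact List.count_pos_iff.mpr ((mem_DD c x).mp hx)
  have hpw : (DD c).Pairwise (fun a b => q b = true → q a = true) := by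
    refine List.Pairwise.imp_of_mem ?_ (PySem.List.sorted_pairwise _ (keyL c))
    intro a b ha hb hle hqb
    have h1 : (List.count a c : Int) ≤ (List.count b c : Int) := by
      rcases Prod.Lex.le_iff.mp hle with h | h
      · exact le_of_lt (by simpa [keyL] using h)
      · exact le_of_eq (by simpa [keyL] using h.1)
    have h2 : List.count b c = 1 := by simpa [hq] using hqb
    have h3 := hcount1 a ha
    simp only [hq, decide_eq_true_eq]
    omega
  have hsplit := split_filter q (DD c) hpw
  have hflat : flatB c (DD c)
      = (DD c).filter q ++ flatB c ((DD c).filter (fun x => !q x)) := by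
    conv_lhs => rw [hsplit]
    unfold flatB
    rw [List.flatMap_append]
    congr 1
    exact flatB_ones c _ (fun x hx => by
      have := List.of_mem_filter hx
      simpa [hq] using this)
  rw [hflat]
  obtain ⟨prev', hp', heq⟩ := loopA_single (wt c)
    ((DD c).filter q) (flatB c ((DD c).filter (fun x => !q x))) none
    ((nodup_DD c).filter q)
    (fun x _ h => by simp at h)
    (fun x hx => by
      have := List.of_mem_filter hx
      simp only [hq, decide_eq_true_eq] at this
      simp [wt, this])
  rw [heq]
  have hmulti := loopA_multi (wt c) (fun x => List.count x c)
    ((DD c).filter (fun x => !q x)) prev'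
    (((DD c).filter q).length % 2 = 1)
    ((nodup_DD c).filter _)
    (fun x hx => by
      rcases hp' with rfl | ⟨y, hy, rfl⟩
      · simp
      · intro h
        have hxq := List.of_mem_filter hx
        have hyq := List.of_mem_filter hy
        rw [Option.some_inj.mp h] at hyq
        rw [hyq] at hxq
        simp at hxq)
    (fun x hx => by
      have hxq := List.of_mem_filter hx
      have hge := hcount1 x (List.mem_of_mem_filter hx)
      simp only [hq, Bool.not_eq_true', decide_eq_false_iff_not] at hxq
      constructor
      · show 2 ≤ List.count x c
        omega
      · simp [wt, hxq])
  beta_reduce at hmulti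
  simp only [flatB]
  rw [hmulti]
  simp [List.countP_eq_length_filter, hq]

lemma solve_eval (c : List Int) :
    solve c = loopA (wt c) none (flatB c (DD c)) := by
  unfold solve
  simp only []
  rw [sorted2_as_sorted, sorted_eq_flat]
  have hbody : (fun (result i : Int) =>
      if i = 0 ∨ PySem.List.pyGetD (flatB c (DD c)) i 0
          ≠ PySem.List.pyGetD (flatB c (DD c)) (i - 2) 0 then
        let result := result + 1
        if (PySem.Dict.counter c).getD (PySem.List.pyGetD (flatB c (DD c)) i 0) 0 = 1 then
          result + 1
        else result
      else result)
    = (fun result i =>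
      if i = 0 ∨ PySem.List.pyGetD (flatB c (DD c)) i 0
          ≠ PySem.List.pyGetD (flatB c (DD c)) (i - 2) 0 then
        result + wt c (PySem.List.pyGetD (flatB c (DD c)) i 0)
      else result) := by
    funext r i
    simp only [PySem.Dict.getD_counter, wt, Nat.cast_eq_one]
    split_ifs <;> ring
  rw [hbody, fold_eq_loopA]

lemma solve_alt_eval (c : List Int) :
    solve_alt c
      = (((PySem.Set.ofList c).countP (fun x => decide (List.count x c = 1)) : ℕ) : Int)
        + ((((PySem.Set.ofList c).countP (fun x => decide (List.count x c = 1)) % 2 : ℕ)) : Int)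
        + (((PySem.Set.ofList c).countP (fun x => !decide (List.count x c = 1)) : ℕ) : Int) := by
  unfold solve_alt
  simp only []
  have hv : (PySem.Dict.counter c).values
      = (PySem.Set.ofList c).map (fun k => (List.count k c : Int)) := by
    simp [PySem.Dict.values, PySem.Dict.items_counter, List.map_map, Function.comp]
  rw [hv]
  have hb : (fun (ug : Int × Int) (v : Int) => if v = 1 then (ug.1 + 1, ug.2) else (ug.1, ug.2 + 1))
      = fun (ug : Int × Int) (v : Int) =>
          ((fun (a : Int) (v : Int) => if v = (1 : Int) then a + 1 else a) ug.1 v,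
           (fun (a : Int) (v : Int) => if ¬ (v = (1 : Int)) then a + 1 else a) ug.2 v) := by
    funext ug v
    by_cases h : v = 1 <;> simp [h]
  rw [hb, PySem.List.foldl_prod_mk (f := fun (a : Int) (v : Int) => if v = 1 then a + 1 else a)
    (g := fun (a : Int) (v : Int) => if ¬ v = 1 then a + 1 else a)]
  rw [PySem.List.foldl_ite_add_one, PySem.List.foldl_ite_add_one]
  simp only [List.countP_map, zero_add]
  have hc1 : ((fun (v : Int) => decide (v = 1)) ∘ fun k => (List.count k c : Int))
      = fun x => decide (List.count x c = 1) := by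
    funext x; simp [Function.comp, Nat.cast_eq_one]
  have hc2 : ((fun (v : Int) => decide ¬(v = 1)) ∘ fun k => (List.count k c : Int))
      = fun x => !decide (List.count x c = 1) := by
    funext x; simp [Function.comp, Nat.cast_eq_one]
  rw [hc1, hc2]
  have hmod : PySem.Int.mod
      (((PySem.Set.ofList c).countP (fun x => decide (List.count x c = 1)) : ℕ) : Int) 2
      = (((PySem.Set.ofList c).countP (fun x => decide (List.count x c = 1)) % 2 : ℕ) : Int) := by
    exact_mod_cast PySem.Int.mod_natCast _ 2
  rw [hmod]

theorem solve_spec : Claim_equal_solve := by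
  intro c _
  unfold Spec_solve
  rw [solve_eval, loop_value, solve_alt_eval]
  have hperm : (DD c).Perm (PySem.Set.ofList c) :=
    PySem.List.sorted_perm (PySem.Set.ofList c) (keyL c) false
  rw [hperm.countP_eq, hperm.countP_eq]
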